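-- pv_equiv track=rewrite | github.com/NestorPala/TDA-tp2 | tp2.py | beautify_solucion
-- ===== SOURCE A (Python) =====
-- def beautify_solucion(indices_solucion, cantidad_oleadas_enemigos):
--     beautified = []
--     for i in range(1, cantidad_oleadas_enemigos + 1):
--         if i in indices_solucion:
--             beautified.append("Atacar")
--         else:
--             beautified.append("Cargar")
--     return beautified
-- ===== SOURCE B (Python) =====
-- def beautify_solucion(indices_solucion, cantidad_oleadas_enemigos):
--     beautified = ["Cargar"] * cantidad_oleadas_enemigos
--     for idx in indices_solucion:
--         if 1 <= idx <= cantidad_oleadas_enemigos: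
--             beautified[idx - 1] = "Atacar"
--     return beautified
-- ===== Notes on version B (the rewrite author's own statement) =====
-- stated objective: faster
-- what changed: B pre-fills a list with "Cargar" and scatters "Atacar" at each in-range solution index in one pass over indices_solucion, instead of A's per-wave membership scan over the whole index list.
import Mathlib
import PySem

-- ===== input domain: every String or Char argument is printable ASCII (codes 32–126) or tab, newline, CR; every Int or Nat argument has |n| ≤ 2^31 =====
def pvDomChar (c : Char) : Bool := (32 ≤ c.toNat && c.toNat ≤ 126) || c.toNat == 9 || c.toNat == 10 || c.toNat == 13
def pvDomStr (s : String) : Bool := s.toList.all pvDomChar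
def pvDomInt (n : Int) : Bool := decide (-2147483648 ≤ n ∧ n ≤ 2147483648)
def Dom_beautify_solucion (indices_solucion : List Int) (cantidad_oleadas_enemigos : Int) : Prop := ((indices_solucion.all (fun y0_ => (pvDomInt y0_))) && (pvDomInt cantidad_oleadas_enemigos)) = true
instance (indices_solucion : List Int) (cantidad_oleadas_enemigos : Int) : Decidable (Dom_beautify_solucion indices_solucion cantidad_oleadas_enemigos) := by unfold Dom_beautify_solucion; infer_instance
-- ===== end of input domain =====

-- B pre-fills a "Cargar" list and scatters "Atacar" at each in-range index in one pass (faster: O(n+m) vs A's O(n*m)).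

-- ===== PORT A =====
def beautify_solucion (indices_solucion : List Int) (cantidad_oleadas_enemigos : Int) : List String :=
  (PySem.List.pyRange 1 (cantidad_oleadas_enemigos + 1) 1).foldl
    (fun beautified i =>
      if i ∈ indices_solucion then beautified ++ ["Atacar"] else beautified ++ ["Cargar"]) []

-- ===== PORT B =====
def beautify_solucion_alt (indices_solucion : List Int) (cantidad_oleadas_enemigos : Int) : List String :=
  indices_solucion.foldl
    (fun beautified idx =>
      if 1 ≤ idx ∧ idx ≤ cantidad_oleadas_enemigos then beautified.set (idx - 1).toNat "Atacar"
      else beautified)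
    (List.replicate cantidad_oleadas_enemigos.toNat "Cargar")

-- ===== PRECONDITION & SPEC =====
def Spec_beautify_solucion (indices_solucion : List Int) (cantidad_oleadas_enemigos : Int) (out : List String) : Prop := out = beautify_solucion_alt indices_solucion cantidad_oleadas_enemigos
instance (indices_solucion : List Int) (cantidad_oleadas_enemigos : Int) (out : List String) : Decidable (Spec_beautify_solucion indices_solucion cantidad_oleadas_enemigos out) := by unfold Spec_beautify_solucion; infer_instance

-- ===== CLAIM (what is proved, stated in full; the proofs are below) =====
def Claim_equal_beautify_solucion : Prop := ∀ (indices_solucion : List Int) (cantidad_oleadas_enemigos : Int), Dom_beautify_solucion indices_solucion cantidad_oleadas_enemigos → Spec_beautify_solucion indices_solucion cantidad_oleadas_enemigos (beautify_solucion indices_solucion cantidad_oleadas_enemigos)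

-- ===== LEMMAS AND PROOFS =====

-- A's loop body rewritten with the if-expression pushed inside the append, so that
-- PySem.List.foldl_append_singleton_eq_map applies.
theorem a_eq_map (idxs : List Int) (n : Int) :
    beautify_solucion idxs n =
      (PySem.List.pyRange 1 (n + 1) 1).map
        (fun i => if i ∈ idxs then "Atacar" else "Cargar") := by
  unfold beautify_solucion
  rw [show (fun (beautified : List String) (i : Int) =>
      if i ∈ idxs then beautified ++ ["Atacar"] else beautified ++ ["Cargar"]) =
      (fun beautified i => beautified ++ [if i ∈ idxs then "Atacar" else "Cargar"]) by
    funext b i; by_cases h : i ∈ idxs <;> simp [h]]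
  simpa using PySem.List.foldl_append_singleton_eq_map (fun i => if i ∈ idxs then "Atacar" else "Cargar") (PySem.List.pyRange 1 (n + 1) 1) []

-- Invariant of B's scatter loop: entry j of the fold result is "Atacar" iff j+1 occurs
-- (in range) in the remaining indices, otherwise the accumulator's entry.
theorem b_get (n : Int) (idxs : List Int) : ∀ (acc : List String) (j : Nat),
    j < acc.length → acc.length = n.toNat →
    (idxs.foldl
      (fun beautified idx =>
        if 1 ≤ idx ∧ idx ≤ n then beautified.set (idx - 1).toNat "Atacar" else beautified)
      acc)[j]? =
      if ((j : Int) + 1) ∈ idxs then some "Atacar" else acc[j]? := by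
  induction idxs with
  | nil => intro acc j hj hl; simp
  | cons i t ih =>
    intro acc j hj hl
    simp only [List.foldl_cons]
    by_cases hc : 1 ≤ i ∧ i ≤ n
    · simp only [if_pos hc]
      rw [ih (acc.set (i - 1).toNat "Atacar") j (by simpa using hj) (by simpa using hl)]
      by_cases he : i = (j : Int) + 1
      · by_cases ht : ((j : Int) + 1) ∈ t <;>
          simp [hj, he, ht]
      · have h1 : i.toNat - 1 ≠ j := by omega
        have h2 : ¬((j : Int) + 1 = i) := fun h => he h.symm
        simp [h1, h2, List.mem_cons]
    · simp only [if_neg hc]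
      rw [ih acc j hj hl]
      have h2 : ¬((j : Int) + 1 = i) := by
        intro h; apply hc; constructor <;> omega
      simp [List.mem_cons, h2]

theorem b_len (n : Int) (idxs : List Int) (acc : List String) :
    (idxs.foldl
      (fun beautified idx =>
        if 1 ≤ idx ∧ idx ≤ n then beautified.set (idx - 1).toNat "Atacar" else beautified)
      acc).length = acc.length := by
  induction idxs generalizing acc with
  | nil => rfl
  | cons i t ih =>
    simp only [List.foldl_cons]
    by_cases hc : 1 ≤ i ∧ i ≤ n
    · rw [if_pos hc, ih, List.length_set]
    · rw [if_neg hc, ih]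

theorem beautify_eq (idxs : List Int) (n : Int) :
    beautify_solucion idxs n = beautify_solucion_alt idxs n := by
  rw [a_eq_map]
  apply List.ext_getElem?
  intro j
  by_cases hj : j < n.toNat
  · have hA : ((PySem.List.pyRange 1 (n + 1) 1).map
        (fun i => if i ∈ idxs then "Atacar" else "Cargar"))[j]? =
        some (if ((1 : Int) + (j : Int)) ∈ idxs then "Atacar" else "Cargar") := by
      rw [List.getElem?_map, PySem.List.getElem?_pyRange_one]
      rw [if_pos (by omega : j < (n + 1 - 1).toNat)]
      rfl
    have hB := b_get n idxs (List.replicate n.toNat "Cargar") j (by simpa using hj) (by simp)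
    rw [hA]
    unfold beautify_solucion_alt
    rw [hB, List.getElem?_replicate]
    have hcomm : ((1 : Int) + (j : Int)) = ((j : Int) + 1) := by ring
    rw [hcomm]
    by_cases hm : ((j : Int) + 1) ∈ idxs <;> simp [hm, hj]
  · have h1 : ((PySem.List.pyRange 1 (n + 1) 1).map
        (fun i => if i ∈ idxs then "Atacar" else "Cargar"))[j]? = none := by
      rw [List.getElem?_eq_none_iff]
      simp only [List.length_map, PySem.List.length_pyRange_one]
      omega
    have h2 : (beautify_solucion_alt idxs n)[j]? = none := by
      rw [List.getElem?_eq_none_iff]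
      unfold beautify_solucion_alt
      rw [b_len]
      simp only [List.length_replicate]
      omega
    rw [h1, h2]

-- ===== VERDICT (by name: the statement is the Claim_ definition above) =====
theorem beautify_solucion_spec : Claim_equal_beautify_solucion := by
  intro idxs n _
  exact beautify_eq idxs n
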